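-- pv_equiv track=rewrite | github.com/ElkeCodes/AdventOfCode2025 | days/02.py | is_valid_id_part_2
-- ===== SOURCE A (Python) =====
-- def is_valid_id_part_2(id: str) -> bool:
--     for n in range(int(len(id) / 2)):
--         repeat_times = len(id) // (n + 1)
--         repeat_section = id[0 : (n + 1)] * repeat_times
--         if id == repeat_section:
--             return False
--     middle = int(len(id) / 2)
--     return id[0:middle] != id[middle : len(id)]
-- ===== SOURCE B (Python) =====
-- def is_valid_id_part_2(id: str) -> bool:
--     # Doubling trick: id is a repetition of a strictly shorter prefix
--     # iff id occurs in id+id at some index strictly between 0 and len(id).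
--     n = len(id)
--     return n > 0 and (id + id).find(id, 1) == n
-- ===== Notes on version B (the rewrite author's own statement) =====
-- stated objective: faster
-- what changed: Replaces A's loop that rebuilds and compares a candidate repetition for every prefix length up to n/2 with the loop-free string-doubling trick: id is a repetition of a shorter prefix iff id occurs in id+id at an index strictly between 0 and n, so B is a single substring search plus a non-empty test.
import Mathlib
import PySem

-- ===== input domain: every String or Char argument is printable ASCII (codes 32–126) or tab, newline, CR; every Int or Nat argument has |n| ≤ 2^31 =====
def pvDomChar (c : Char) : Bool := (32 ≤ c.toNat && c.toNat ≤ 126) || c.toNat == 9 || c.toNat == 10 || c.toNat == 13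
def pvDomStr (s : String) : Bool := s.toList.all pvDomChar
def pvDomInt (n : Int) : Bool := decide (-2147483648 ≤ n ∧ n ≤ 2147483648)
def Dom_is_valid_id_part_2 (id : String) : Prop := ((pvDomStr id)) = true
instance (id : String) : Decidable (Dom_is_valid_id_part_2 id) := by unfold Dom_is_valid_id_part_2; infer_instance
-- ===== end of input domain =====

-- B replaces A's candidate-prefix loop with the loop-free doubling trick:
-- id is a repetition of a shorter prefix iff id occurs in id+id strictly between 0 and len(id).

-- ===== PORT A =====
-- Python's int(len(id) / 2) (true division, then truncation) equals len(id) // 2 here; ported as Int division.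
def pvALoop (l : List Char) : List Int → Bool
  | [] =>
      -- middle = int(len(id) / 2); return id[0:middle] != id[middle:len(id)]
      let middle : Int := (l.length : Int) / 2
      decide (¬ (PySem.List.slice l (some 0) (some middle)
          = PySem.List.slice l (some middle) (some (l.length : Int))))
  | n :: ns =>
      let repeat_times : Int := PySem.Int.floordiv (l.length : Int) (n + 1)
      let repeat_section : List Char :=
        PySem.List.pyRepeat (PySem.List.slice l (some 0) (some (n + 1))) repeat_times
      if l = repeat_section then false else pvALoop l ns

def is_valid_id_part_2 (id : String) : Bool :=
  pvALoop id.toList (PySem.List.pyRange 0 ((id.toList.length : Int) / 2) 1)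

-- ===== PORT B =====
-- n = len(id); return n > 0 and (id + id).find(id, 1) == n
def is_valid_id_part_2_alt (id : String) : Bool :=
  let l := id.toList
  let n := l.length
  decide (0 < n) && decide (PySem.Chars.findFrom (l ++ l) l 1 = (n : Int))

-- ===== PRECONDITION & SPEC =====
def Spec_is_valid_id_part_2 (id : String) (out : Bool) : Prop := out = is_valid_id_part_2_alt id
instance (id : String) (out : Bool) : Decidable (Spec_is_valid_id_part_2 id out) := by unfold Spec_is_valid_id_part_2; infer_instance

-- ===== CLAIM (what is proved, stated in full; the proofs are below) =====
def Claim_equal_is_valid_id_part_2 : Prop := ∀ (id : String), Dom_is_valid_id_part_2 id → Spec_is_valid_id_part_2 id (is_valid_id_part_2 id)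

-- ===== LEMMAS AND PROOFS =====

-- "l is periodic with a period p that divides the length and p ≤ len/2" (A's loop condition)
def pvPer (l : List Char) : Prop :=
  ∃ p : Nat, 1 ≤ p ∧ p ≤ l.length / 2 ∧ l.length % p = 0 ∧ l.drop p = l.take (l.length - p)

-- "some nontrivial rotation of l equals l" (B's doubling condition)
def pvRot (l : List Char) : Prop :=
  ∃ j : Nat, 1 ≤ j ∧ j < l.length ∧ l.drop j ++ l.take j = l

-- proof-side helper: "some p in ps satisfies A's divisibility + shift condition"
def pvAnyShift (l : List Char) : List Int → Bool
  | [] => false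
  | p :: ps =>
      (decide (PySem.Int.mod (l.length : Int) p = 0) &&
        decide (PySem.List.slice l (some p) none = PySem.List.slice l none (some (-p))))
      || pvAnyShift l ps

-- (k+1)-fold repetition, with the extra copy split off at the END
theorem pvFlatRepSucc' (k : Nat) (w : List Char) :
    (List.replicate (k + 1) w).flatten = (List.replicate k w).flatten ++ w := by
  rw [List.replicate_succ', List.flatten_append]; simp

-- the one-shift property for a divisor p of the length forces the string to be
-- the (len/p)-fold repetition of its p-prefix (strong induction on the length)
theorem pvShiftRep (p : Nat) (hp : 0 < p) : ∀ (m : Nat) (l : List Char), l.length = m →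
    l.length % p = 0 → l.drop p = l.take (l.length - p) →
    (List.replicate (l.length / p) (l.take p)).flatten = l := by
  intro m
  induction m using Nat.strong_induction_on with
  | _ m ih =>
    intro l hm hmod hshift
    by_cases h0 : l.length = 0
    · simp [List.eq_nil_of_length_eq_zero h0]
    · have hpn : p ≤ l.length := by
        rcases Nat.lt_or_ge l.length p with h | h
        · have := Nat.mod_eq_of_lt h; omega
        · exact h
      obtain ⟨k, hk⟩ : p ∣ l.length := Nat.dvd_of_mod_eq_zero hmod
      have hdiv : l.length / p = k := by rw [hk, Nat.mul_div_cancel_left _ hp]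
      by_cases hep : l.length = p
      · have hk1 : k = 1 := by
          rcases Nat.lt_or_ge k 2 with h | h
          · match k, hk with
            | 0, hk => omega
            | 1, hk => rfl
          · nlinarith
        rw [hdiv, hk1]
        simp only [List.replicate_one, List.flatten_cons, List.flatten_nil, List.append_nil]
        exact List.take_of_length_le (by omega)
      · have hk2 : 2 ≤ k := by
          rcases Nat.lt_or_ge k 2 with h | h
          · match k, hk with
            | 0, hk => omega
            | 1, hk => omega
          · exact h
        set n := l.length with hn
        have hsub : n - p = p * (k - 1) := by rw [hk, Nat.mul_sub]; omega
        have h2p : 2 * p ≤ n := by nlinarith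
        set l' := l.drop p with hl'
        have hlen' : l'.length = n - p := by rw [hl', List.length_drop]
        have hmod' : l'.length % p = 0 := by rw [hlen', hsub]; exact Nat.mul_mod_right p _
        have hshift' : l'.drop p = l'.take (l'.length - p) := by
          rw [hlen']
          conv_lhs => rw [hshift]
          rw [List.drop_take]
        have hrec := ih (n - p) (by omega) l' hlen' hmod' hshift'
        have htake' : l'.take p = l.take p := by
          rw [hshift, List.take_take]
          congr 1
          omega
        have hdiv' : l'.length / p = k - 1 := by
          rw [hlen', hsub, Nat.mul_div_cancel_left _ hp]
        rw [htake', hdiv'] at hrec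
        have hrepl : List.replicate (n / p) (l.take p)
            = l.take p :: List.replicate (k - 1) (l.take p) := by
          rw [← List.replicate_succ, hdiv]
          congr 1
          omega
        rw [hrepl]
        simp only [List.flatten_cons]
        rw [hrec, hl']
        exact List.take_append_drop p l

-- The two inner tests are equivalent (p ≥ 1):
-- "id == id[0:p] * (len(id) // p)"  iff  "len(id) % p == 0 and id[p:] == id[:-p]".
theorem pvBodyIff (l : List Char) (p : Nat) (hp : 0 < p) :
    (l = PySem.List.pyRepeat (PySem.List.slice l (some 0) (some (p : Int)))
        (PySem.Int.floordiv (l.length : Int) (p : Int)))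
    ↔ (PySem.Int.mod (l.length : Int) (p : Int) = 0 ∧
       PySem.List.slice l (some (p : Int)) none = PySem.List.slice l none (some (-(p : Int)))) := by
  rw [PySem.List.slice_zero_start, PySem.List.slice_to_natCast, PySem.List.slice_from_natCast,
    PySem.List.slice_to_neg_natCast (k := p) (xs := l) hp]
  simp only [PySem.List.pyRepeat, PySem.Int.floordiv_natCast, PySem.Int.mod_natCast,
    Int.toNat_natCast, Nat.cast_eq_zero]
  constructor
  · intro h
    have hlen := congrArg List.length h
    simp only [List.length_flatten, List.map_replicate, List.length_take, List.sum_replicate,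
      smul_eq_mul] at hlen
    rcases Nat.lt_or_ge l.length p with hlt | hge
    · have hd0 : l.length / p = 0 := Nat.div_eq_of_lt hlt
      rw [hd0] at h
      simp only [List.replicate_zero, List.flatten_nil] at h
      subst h
      simp
    · have hmin : min p l.length = p := by omega
      rw [hmin] at hlen
      rw [Nat.mul_comm] at hlen
      have hmod : l.length % p = 0 := by
        have := Nat.div_add_mod l.length p
        omega
      refine ⟨hmod, ?_⟩
      set k := l.length / p with hkdef
      have hk1 : 1 ≤ k := (Nat.one_le_div_iff hp).mpr hge
      have hw : (l.take p).length = p := by simp; omega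
      have hcons : List.replicate k (l.take p) = l.take p :: List.replicate (k - 1) (l.take p) := by
        rw [← List.replicate_succ]; congr 1; omega
      have hdrop : l.drop p = (List.replicate (k - 1) (l.take p)).flatten := by
        conv_lhs => rw [h, hcons]
        simp only [List.flatten_cons]
        exact List.drop_left' hw
      have hsnoc : (List.replicate k (l.take p)).flatten
          = (List.replicate (k - 1) (l.take p)).flatten ++ l.take p := by
        conv_lhs => rw [show k = (k - 1) + 1 by omega]
        exact pvFlatRepSucc' _ _
      have hflen : ((List.replicate (k - 1) (l.take p)).flatten).length = l.length - p := by
        simp only [List.length_flatten, List.map_replicate, List.sum_replicate, smul_eq_mul, hw]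
        have h1 : (k - 1) * p = k * p - 1 * p := Nat.sub_mul k 1 p
        rw [Nat.mul_comm] at hlen
        omega
      have htake : l.take (l.length - p) = (List.replicate (k - 1) (l.take p)).flatten := by
        nth_rewrite 2 [h]
        rw [hsnoc]
        exact List.take_left' hflen
      rw [hdrop, htake]
  · rintro ⟨h1, h2⟩
    exact (pvShiftRep p hp l.length l rfl h1 h2).symm

-- A's early-return loop = "no shift condition fires on the shifted range" && the tail value
theorem pvLoopSplit (l : List Char) : ∀ (ps : List Int), (∀ x ∈ ps, 0 ≤ x) →
    pvALoop l ps = ((!pvAnyShift l (ps.map (· + 1))) && pvALoop l []) := by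
  intro ps
  induction ps with
  | nil =>
    intro _
    show pvALoop l [] = ((!pvAnyShift l ([].map (· + 1))) && pvALoop l [])
    rw [show pvAnyShift l ([].map (· + 1)) = false from rfl]
    simp
  | cons n ns ihn =>
    intro hnn
    have hn : 0 ≤ n := hnn n (by simp)
    have hcast : n + 1 = ((n.toNat + 1 : Nat) : Int) := by omega
    by_cases h : l = PySem.List.pyRepeat (PySem.List.slice l (some 0) (some (n + 1)))
        (PySem.Int.floordiv (l.length : Int) (n + 1))
    · have hb : (decide (PySem.Int.mod (l.length : Int) (n + 1) = 0) &&
          decide (PySem.List.slice l (some (n + 1)) none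
            = PySem.List.slice l none (some (-(n + 1))))) = true := by
        rw [hcast] at h ⊢
        have hc := (pvBodyIff l (n.toNat + 1) (by omega)).mp h
        simp only [hc.1, hc.2, decide_true, Bool.and_self]
      simp only [pvALoop, List.map_cons, pvAnyShift]
      rw [if_pos h, hb]
      simp
    · have hb : (decide (PySem.Int.mod (l.length : Int) (n + 1) = 0) &&
          decide (PySem.List.slice l (some (n + 1)) none
            = PySem.List.slice l none (some (-(n + 1))))) = false := by
        rw [hcast] at h ⊢
        rw [Bool.and_eq_false_iff]
        by_contra hcon
        push Not at hcon
        simp only [ne_eq, decide_eq_false_iff_not, not_not] at hcon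
        exact h ((pvBodyIff l (n.toNat + 1) (by omega)).mpr hcon)
      simp only [pvALoop, List.map_cons, pvAnyShift]
      rw [if_neg h, hb]
      exact ihn (fun x hx => hnn x (by simp [hx]))

-- pvAnyShift over the range [1, n/2] is exactly pvPer
theorem pvAnyShift_exists (l : List Char) : ∀ (ps : List Int),
    pvAnyShift l ps = true ↔ ∃ p ∈ ps, PySem.Int.mod (l.length : Int) p = 0 ∧
      PySem.List.slice l (some p) none = PySem.List.slice l none (some (-p)) := by
  intro ps
  induction ps with
  | nil => simp [pvAnyShift]
  | cons q qs ihq =>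
    simp only [pvAnyShift, Bool.or_eq_true, Bool.and_eq_true, decide_eq_true_eq, ihq,
      List.mem_cons]
    constructor
    · rintro (⟨h1, h2⟩ | ⟨p, hp, h⟩)
      · exact ⟨q, Or.inl rfl, h1, h2⟩
      · exact ⟨p, Or.inr hp, h⟩
    · rintro ⟨p, (rfl | hp), h⟩
      · exact Or.inl h
      · exact Or.inr ⟨p, hp, h⟩

theorem pvAnyShift_iff_per (l : List Char) :
    pvAnyShift l (PySem.List.pyRange 1 ((l.length : Int) / 2 + 1) 1) = true ↔ pvPer l := by
  rw [pvAnyShift_exists]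
  have hdiv : ((l.length / 2 : Nat) : Int) = (l.length : Int) / 2 := Int.natCast_ediv l.length 2
  constructor
  · rintro ⟨p, hp, hmod, hsl⟩
    rw [PySem.List.mem_pyRange_one] at hp
    obtain ⟨hp1, hp2⟩ := hp
    have hq : p = ((p.toNat : Nat) : Int) := by omega
    rw [hq] at hmod hsl
    rw [PySem.Int.mod_natCast] at hmod
    rw [PySem.List.slice_from_natCast,
      PySem.List.slice_to_neg_natCast (k := p.toNat) (xs := l) (by omega)] at hsl
    exact ⟨p.toNat, by omega, by omega, by exact_mod_cast hmod, hsl⟩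
  · rintro ⟨q, hq1, hq2, hmod, hsl⟩
    refine ⟨(q : Int), ?_, ?_, ?_⟩
    · rw [PySem.List.mem_pyRange_one]
      constructor
      · exact_mod_cast hq1
      · omega
    · rw [PySem.Int.mod_natCast]
      exact_mod_cast hmod
    · rw [PySem.List.slice_from_natCast,
        PySem.List.slice_to_neg_natCast (k := q) (xs := l) (by omega)]
      exact hsl

-- When no divisor period fires, A's final half-comparison equals "the string is non-empty".
theorem pvBaseEq (l : List Char) (hP : ¬ pvPer l) :
    pvALoop l [] = decide (0 < l.length) := by
  simp only [pvALoop]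
  have hmid : ((l.length : Int) / 2) = ((l.length / 2 : Nat) : Int) :=
    (Int.natCast_ediv l.length 2).symm
  rw [hmid, PySem.List.slice_zero_start, PySem.List.slice_to_natCast, PySem.List.slice_natCast]
  have hdt : (l.drop (l.length / 2)).take (l.length - l.length / 2) = l.drop (l.length / 2) :=
    List.take_of_length_le (by simp)
  rw [hdt]
  rcases Nat.eq_zero_or_pos l.length with h0 | hpos
  · simp [List.eq_nil_of_length_eq_zero h0]
  · rcases Nat.even_or_odd l.length with he | ho
    · obtain ⟨r, hr⟩ := he
      have hhalf : l.length / 2 = r := by omega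
      simp only [hpos, decide_eq_true_eq, decide_true]
      intro heq
      apply hP
      refine ⟨r, by omega, by omega, ?_, ?_⟩
      · rw [hr]
        simp [Nat.add_mod_right]
      · rw [show l.length - r = r by omega, ← hhalf]
        exact heq.symm
    · obtain ⟨r, hr⟩ := ho
      have hne : (l.take (l.length / 2)).length ≠ (l.drop (l.length / 2)).length := by
        simp only [List.length_take, List.length_drop]
        omega
      simp only [hpos, decide_eq_true_eq, decide_true]
      intro heq
      exact hne (congrArg List.length heq)

-- A computes: "non-empty and not pvPer"
theorem pvA_char (id : String) :
    is_valid_id_part_2 id = true ↔ (0 < id.toList.length ∧ ¬ pvPer id.toList) := by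
  unfold is_valid_id_part_2
  set l := id.toList with hl
  have hnn : ∀ x ∈ PySem.List.pyRange 0 ((l.length : Int) / 2) 1, 0 ≤ x := by
    intro x hx
    rw [PySem.List.mem_pyRange_one] at hx
    exact hx.1
  rw [pvLoopSplit l _ hnn]
  have hrange : (PySem.List.pyRange 0 ((l.length : Int) / 2) 1).map (· + 1)
      = PySem.List.pyRange 1 ((l.length : Int) / 2 + 1) 1 := by
    rw [PySem.List.pyRange_one, PySem.List.pyRange_one, List.map_map]
    have hcnt : ((l.length : Int) / 2 + 1 - 1).toNat = ((l.length : Int) / 2 - 0).toNat := by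
      omega
    rw [hcnt]
    apply List.map_congr_left
    intro k _
    simp
    omega
  rw [hrange]
  cases hB : pvAnyShift l (PySem.List.pyRange 1 ((l.length : Int) / 2 + 1) 1) with
  | true =>
    have hPer := (pvAnyShift_iff_per l).mp hB
    simp only [Bool.not_true, Bool.false_and]
    constructor
    · intro h
      cases h
    · rintro ⟨_, h2⟩
      exact absurd hPer h2
  | false =>
    have hPer : ¬ pvPer l := fun h => by simp [(pvAnyShift_iff_per l).mpr h] at hB
    rw [pvBaseEq l hPer]
    simp [hPer]

-- rotation by j fixed gives the cyclic index relation
theorem pvRotGetD (l : List Char) (j : Nat) (hj : j ≤ l.length)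
    (h : l.drop j ++ l.take j = l) :
    ∀ i, i < l.length → l.getD ((i + j) % l.length) 'A' = l.getD i 'A' := by
  intro i hi
  conv_rhs => rw [← h]
  simp only [List.getD_eq_getElem?_getD, List.getElem?_append, List.length_drop,
    List.getElem?_drop, List.getElem?_take]
  split_ifs with h1 h2
  · rw [Nat.mod_eq_of_lt (by omega), Nat.add_comm]
  · have hmod : (i + j) % l.length = i - (l.length - j) := by
      rw [Nat.mod_eq_sub_mod (by omega), Nat.mod_eq_of_lt (by omega)]
      omega
    rw [hmod]
  · exact (by omega : False).elim

theorem pvRotIter (l : List Char) (j : Nat) (hj : j ≤ l.length)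
    (h : l.drop j ++ l.take j = l) :
    ∀ (m : Nat), ∀ i, i < l.length → l.getD ((i + m * j) % l.length) 'A' = l.getD i 'A' := by
  intro m
  induction m with
  | zero =>
    intro i hi
    rw [Nat.zero_mul, Nat.add_zero, Nat.mod_eq_of_lt hi]
  | succ m ih =>
    intro i hi
    have hkey : (i + (m + 1) * j) % l.length = (((i + m * j) % l.length) + j) % l.length := by
      rw [Nat.mod_add_mod]
      congr 1
      ring
    rw [hkey]
    rw [pvRotGetD l j hj h ((i + m * j) % l.length) (Nat.mod_lt _ (by omega))]
    exact ih i hi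

-- Bezout: some multiple of j is congruent to gcd n j modulo n
theorem pvBezout (n j : Nat) (hn : 0 < n) (hj : 1 ≤ j) (hjn : j < n) :
    ∃ m : Nat, (m * j) % n = Nat.gcd n j := by
  set d := Nat.gcd n j with hd
  have hdj : d ≤ j := Nat.le_of_dvd (by omega) (Nat.gcd_dvd_right n j)
  have hbez := Nat.gcd_eq_gcd_ab n j
  set a := Nat.gcdA n j with ha
  set b := Nat.gcdB n j with hb
  have hnz : (n : Int) ≠ 0 := by exact_mod_cast Nat.pos_iff_ne_zero.mp hn
  refine ⟨(b % (n : Int)).toNat, ?_⟩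
  have hb0 : 0 ≤ b % (n : Int) := Int.emod_nonneg b hnz
  have hcastm : (((b % (n : Int)).toNat : Nat) : Int) = b % (n : Int) := Int.toNat_of_nonneg hb0
  have hint : ((((b % (n : Int)).toNat * j) % n : Nat) : Int) = (d : Int) := by
    push_cast
    rw [hcastm]
    calc (b % (n : Int)) * (j : Int) % (n : Int)
        = b * (j : Int) % (n : Int) := by
          rw [Int.mul_emod, Int.emod_emod_of_dvd b dvd_rfl, ← Int.mul_emod]
      _ = ((d : Int) - (n : Int) * a) % (n : Int) := by
          congr 1
          rw [hbez]
          ring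
      _ = (d : Int) % (n : Int) := Int.sub_mul_emod_self_left ..
      _ = (d : Int) := Int.emod_eq_of_lt (by positivity) (by exact_mod_cast by omega)
  exact_mod_cast hint

theorem pvRot_per (l : List Char) : pvRot l → pvPer l := by
  rintro ⟨j, hj1, hjn, hrot⟩
  have hn : 0 < l.length := by omega
  have hd1 : 1 ≤ Nat.gcd l.length j := Nat.gcd_pos_of_pos_right _ (by omega)
  have hdvd : Nat.gcd l.length j ∣ l.length := Nat.gcd_dvd_left _ _
  have hdj : Nat.gcd l.length j ≤ j := Nat.le_of_dvd (by omega) (Nat.gcd_dvd_right _ _)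
  set d := Nat.gcd l.length j with hd
  obtain ⟨m0, hm0⟩ := pvBezout l.length j hn hj1 hjn
  have hiter := pvRotIter l j (by omega) hrot m0
  obtain ⟨k, hk⟩ := hdvd
  have hk2 : 2 ≤ k := by
    rcases Nat.lt_or_ge k 2 with h | h
    · match k, hk with
      | 0, hk => omega
      | 1, hk => omega
    · exact h
  have h2d : 2 * d ≤ l.length := by
    calc 2 * d = d * 2 := by ring
      _ ≤ d * k := Nat.mul_le_mul_left d hk2
      _ = l.length := hk.symm
  have hshift : l.drop d = l.take (l.length - d) := by
    apply List.ext_getElem?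
    intro i
    simp only [List.getElem?_drop, List.getElem?_take]
    by_cases hcase : i < l.length - d
    · have hi : i < l.length := by omega
      have hidx : (i + m0 * j) % l.length = i + d := by
        rw [Nat.add_mod, hm0, ← hd, Nat.mod_eq_of_lt hi, Nat.mod_eq_of_lt (by omega)]
      have hgd := hiter i hi
      rw [hidx] at hgd
      rw [List.getD_eq_getElem l 'A' (by omega), List.getD_eq_getElem l 'A' (by omega)] at hgd
      rw [if_pos hcase, show d + i = i + d from by omega,
        List.getElem?_eq_getElem (by omega), List.getElem?_eq_getElem (by omega)]
      exact congrArg some hgd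
    · rw [if_neg hcase, List.getElem?_eq_none (by omega)]
  exact ⟨d, hd1, by omega, (by simp [hk, Nat.mul_mod_right] : l.length % d = 0), hshift⟩

theorem pvPer_rot (l : List Char) : pvPer l → pvRot l := by
  rintro ⟨p, hp1, hp2, hmod, hshift⟩
  have h2p : 2 * p ≤ l.length := by omega
  have hrep := pvShiftRep p (by omega) l.length l rfl hmod hshift
  have hwlen : (l.take p).length = p := by simp; omega
  have hnk : l.length = l.length / p * p := (Nat.div_mul_cancel (Nat.dvd_of_mod_eq_zero hmod)).symm
  set k := l.length / p with hk
  have hk2 : 2 ≤ k := by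
    rcases Nat.lt_or_ge k 2 with h | h
    · match k, hnk with
      | 0, hnk => omega
      | 1, hnk => omega
    · exact h
  refine ⟨p, hp1, by omega, ?_⟩
  have hcons : List.replicate k (l.take p) = l.take p :: List.replicate (k - 1) (l.take p) := by
    rw [← List.replicate_succ]
    congr 1
    omega
  have hdrop : l.drop p = (List.replicate (k - 1) (l.take p)).flatten := by
    conv_lhs => rw [← hrep, hcons]
    simp only [List.flatten_cons]
    exact List.drop_left' hwlen
  rw [hdrop]
  calc (List.replicate (k - 1) (l.take p)).flatten ++ l.take p
      = (List.replicate ((k - 1) + 1) (l.take p)).flatten := (pvFlatRepSucc' _ _).symm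
    _ = l := by rw [show (k - 1) + 1 = k by omega, hrep]

-- prefix occurrence in the doubled list = fixed rotation
theorem pvPrefixRotIff (l : List Char) (j : Nat) (hj : j ≤ l.length) :
    l <+: (l.drop j ++ l) ↔ l.drop j ++ l.take j = l := by
  have hdl : (l.drop j).length = l.length - j := by simp
  constructor
  · intro h
    have ht := List.prefix_iff_eq_take.mp h
    rw [List.take_append, List.take_of_length_le (by omega),
      show l.length - (l.drop j).length = j by omega] at ht
    exact ht.symm
  · intro h
    rw [List.prefix_iff_eq_take, List.take_append,
      List.take_of_length_le (by omega), show l.length - (l.drop j).length = j by omega]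
    exact h.symm

-- B's find test = "no nontrivial rotation fixes l"
theorem pvFindChar (l : List Char) (hn : 0 < l.length) :
    (PySem.Chars.findFrom (l ++ l) l 1 = (l.length : Int)) ↔ ¬ pvRot l := by
  have h1 : (1 : Nat) ≤ (l ++ l).length := by simp; omega
  rw [show (1 : Int) = ((1 : Nat) : Int) from rfl, PySem.Chars.findFrom_natCast (l ++ l) l 1 h1]
  have hDd : ∀ i, i < l.length → ((l ++ l).drop 1).drop i = l.drop (1 + i) ++ l := by
    intro i hi
    rw [List.drop_drop, List.drop_append,
      show 1 + i - l.length = 0 by omega, List.drop_zero]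
  have hocc_last : l <+: ((l ++ l).drop 1).drop (l.length - 1) := by
    rw [hDd (l.length - 1) (by omega), show 1 + (l.length - 1) = l.length from by omega,
      List.drop_length, List.nil_append]
  have hinf : l <:+: (l ++ l).drop 1 := by
    rw [← PySem.Chars.isIn_iff_infix, ← PySem.Chars.exists_prefix_drop_iff_isIn _ _]
    exact ⟨l.length - 1, hocc_last⟩
  have hne : PySem.Chars.find ((l ++ l).drop 1) l ≠ -1 := (PySem.Chars.find_ne_neg_one_iff _ _).mpr hinf
  have hf0 : 0 ≤ PySem.Chars.find ((l ++ l).drop 1) l := (PySem.Chars.find_nonneg_iff _ _).mpr hinf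
  have hspec := PySem.Chars.find_spec hf0
  set f := PySem.Chars.find ((l ++ l).drop 1) l with hf
  have hub : f.toNat ≤ l.length - 1 := by
    by_contra hgt
    push Not at hgt
    exact hspec.2 (l.length - 1) (by omega) hocc_last
  rw [if_neg hne]
  constructor
  · intro heq
    rintro ⟨j, hj1, hjn, hr⟩
    have hfn : f.toNat = l.length - 1 := by omega
    have hoccj : l <+: ((l ++ l).drop 1).drop (j - 1) := by
      rw [hDd (j - 1) (by omega), show 1 + (j - 1) = j from by omega]
      exact (pvPrefixRotIff l j (by omega)).mpr hr
    exact hspec.2 (j - 1) (by omega) hoccj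
  · intro hnr
    have hlt : ¬ f.toNat < l.length - 1 := by
      intro hlt
      apply hnr
      have hocc := hspec.1
      rw [hDd f.toNat (by omega)] at hocc
      exact ⟨f.toNat + 1, by omega, by omega,
        (pvPrefixRotIff l (f.toNat + 1) (by omega)).mp
          (by rw [show f.toNat + 1 = 1 + f.toNat from by omega]; exact hocc)⟩
    omega

theorem pvB_char (id : String) :
    is_valid_id_part_2_alt id = true ↔ (0 < id.toList.length ∧ ¬ pvRot id.toList) := by
  simp only [is_valid_id_part_2_alt, Bool.and_eq_true, decide_eq_true_eq]
  constructor
  · rintro ⟨h1, h2⟩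
    exact ⟨h1, (pvFindChar _ h1).mp h2⟩
  · rintro ⟨h1, h2⟩
    exact ⟨h1, (pvFindChar _ h1).mpr h2⟩

-- ===== VERDICT (by name: the statement is the Claim_ definition above) =====
theorem is_valid_id_part_2_spec : Claim_equal_is_valid_id_part_2 := by
  intro id _
  unfold Spec_is_valid_id_part_2
  rw [Bool.eq_iff_iff, pvA_char, pvB_char]
  constructor
  · rintro ⟨h1, h2⟩
    exact ⟨h1, fun h => h2 (pvRot_per _ h)⟩
  · rintro ⟨h1, h2⟩
    exact ⟨h1, fun h => h2 (pvPer_rot _ h)⟩
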